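-- pv_equiv track=rewrite | github.com/hirose-suguru/information-processing | modules/passes.py | _fix_levels_once
-- ===== SOURCE A (Python) =====
-- def _fix_levels_once(levels: list[int]) -> tuple[list[int], bool]:
--     n = len(levels)
--     new_levels = list(levels)
--     changed = False
--
--     for i, lv in enumerate(levels):
--         if lv == 0:
--             continue
--         child_levels = []
--         for j in range(i + 1, n):
--             clv = levels[j]
--             if clv == 0:
--                 continue
--             if clv <= lv:
--                 break
--             child_levels.append(clv)
--
--         if not child_levels or min(child_levels) <= lv + 1:
--             continue
--
--         for j in range(i + 1, n):
--             clv = levels[j]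
--             if clv == 0:
--                 continue
--             if clv <= lv:
--                 break
--             new_levels[j] = clv - 1
--             changed = True
--
--     return new_levels, changed
-- ===== SOURCE B (Python) =====
-- def _fix_levels_once(levels: list[int]) -> tuple[list[int], bool]:
--     # One forward scan per nonzero root computes (subtree-min, break position)
--     # together; qualifying subtrees become half-open cover intervals, applied in a
--     # single difference-array sweep. No copy-and-mutate, no separate min()/rewrite scans.
--     n = len(levels)
--     intervals = []
--     for i, lv in enumerate(levels):
--         if lv == 0:
--             continue
--         mn = None
--         e = n
--         for j in range(i + 1, n):
--             clv = levels[j]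
--             if clv == 0:
--                 continue
--             if clv <= lv:
--                 e = j
--                 break
--             if mn is None or clv < mn:
--                 mn = clv
--         if mn is not None and mn > lv + 1:
--             intervals.append((i, e))
--     delta = [0] * (n + 1)
--     for a, b in intervals:
--         delta[a + 1] += 1
--         delta[b] -= 1
--     new_levels = []
--     acc = 0
--     for j, v in enumerate(levels):
--         acc += delta[j]
--         new_levels.append(v - 1 if v != 0 and acc > 0 else v)
--     return new_levels, bool(intervals)
-- ===== Notes on version B (the rewrite author's own statement) =====
-- stated objective: alternative
-- what changed: A copies the list and, per nonzero root, runs three passes (collect child levels, min(), then a rescan that mutates the copy); B runs one scan per root computing (subtree-min, break position) together, collects qualifying cover intervals, and applies them all in a single difference-array sweep.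
import Mathlib
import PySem

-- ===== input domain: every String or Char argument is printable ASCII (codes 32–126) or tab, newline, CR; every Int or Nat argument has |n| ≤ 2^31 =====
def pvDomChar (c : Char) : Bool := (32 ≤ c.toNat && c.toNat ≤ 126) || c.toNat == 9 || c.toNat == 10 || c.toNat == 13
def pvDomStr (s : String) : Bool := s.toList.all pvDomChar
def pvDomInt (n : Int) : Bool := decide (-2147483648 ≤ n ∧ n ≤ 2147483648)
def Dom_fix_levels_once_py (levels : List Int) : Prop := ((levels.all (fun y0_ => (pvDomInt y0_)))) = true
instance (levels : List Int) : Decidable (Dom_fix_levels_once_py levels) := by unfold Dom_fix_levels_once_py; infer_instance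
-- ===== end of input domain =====

-- B replaces A's copy-and-mutate with three scans per root by one scan per root
-- collecting qualifying cover intervals plus a single difference-array sweep
-- (objective: alternative decomposition; same worst-case asymptotics).

-- ===== PORT A =====
-- first inner loop: collect child_levels (break at first nonzero ≤ lv)
def pvAChildScan (lv : Int) : List Int → List Int
  | [] => []
  | clv :: rest =>
    if clv = 0 then pvAChildScan lv rest
    else if clv ≤ lv then []
    else clv :: pvAChildScan lv rest

-- second inner loop: new_levels[j] = clv - 1 writes; j is the absolute index of the head
def pvAWrite (lv : Int) : Nat → List Int → List Int × Bool → List Int × Bool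
  | _, [], st => st
  | j, clv :: rest, (nl, ch) =>
    if clv = 0 then pvAWrite lv (j+1) rest (nl, ch)
    else if clv ≤ lv then (nl, ch)
    else pvAWrite lv (j+1) rest (nl.set j (clv - 1), true)

-- outer loop over enumerate(levels); the suffix after index i is carried along
def pvAOuter : Nat → List Int → List Int × Bool → List Int × Bool
  | _, [], st => st
  | i, lv :: rest, st =>
    if lv = 0 then pvAOuter (i+1) rest st
    else
      match PySem.List.min? (pvAChildScan lv rest) (fun x => x) with
      | none => pvAOuter (i+1) rest st
      | some m =>
        if m ≤ lv + 1 then pvAOuter (i+1) rest st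
        else pvAOuter (i+1) rest (pvAWrite lv (i+1) rest st)

def fix_levels_once_py (levels : List Int) : List Int × Bool :=
  pvAOuter 0 levels (levels, false)

-- ===== PORT B =====
-- one scan per root: running minimum of nonzero children and the break position e
def pvBScan (lv : Int) : Nat → List Int → Option Int → Option Int × Nat
  | j, [], mn => (mn, j)
  | j, clv :: rest, mn =>
    if clv = 0 then pvBScan lv (j+1) rest mn
    else if clv ≤ lv then (mn, j)
    else pvBScan lv (j+1) rest
      (match mn with
       | none => some clv
       | some m => if clv < m then some clv else some m)

-- collect the qualifying cover intervals (i, e)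
def pvBCollect : Nat → List Int → List (Nat × Nat)
  | _, [] => []
  | i, lv :: rest =>
    if lv = 0 then pvBCollect (i+1) rest
    else
      match pvBScan lv (i+1) rest none with
      | (some m, e) => if lv + 1 < m then (i, e) :: pvBCollect (i+1) rest else pvBCollect (i+1) rest
      | (none, _) => pvBCollect (i+1) rest

-- difference array: delta[a+1] += 1; delta[b] -= 1
def pvIncAt (d : List Int) (t : Nat) (c : Int) : List Int := d.set t (d.getD t 0 + c)

def pvBDelta (n : Nat) (ivs : List (Nat × Nat)) : List Int :=
  ivs.foldl (fun d ab => pvIncAt (pvIncAt d (ab.1 + 1) 1) ab.2 (-1)) (List.replicate (n+1) 0)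

-- final sweep with a running coverage counter
def pvBSweep (delta : List Int) : Nat → Int → List Int → List Int
  | _, _, [] => []
  | j, acc, v :: rest =>
    let acc' := acc + delta.getD j 0
    (if v ≠ 0 ∧ 0 < acc' then v - 1 else v) :: pvBSweep delta (j+1) acc' rest

def fix_levels_once_py_alt (levels : List Int) : List Int × Bool :=
  let ivs := pvBCollect 0 levels
  let delta := pvBDelta levels.length ivs
  (pvBSweep delta 0 0 levels, !ivs.isEmpty)

-- ===== PRECONDITION & SPEC =====
def Spec_fix_levels_once_py (levels : List Int) (out : List Int × Bool) : Prop := out = fix_levels_once_py_alt levels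
instance (levels : List Int) (out : List Int × Bool) : Decidable (Spec_fix_levels_once_py levels out) := by unfold Spec_fix_levels_once_py; infer_instance

-- ===== CLAIM (what is proved, stated in full; the proofs are below) =====
def Claim_equal_fix_levels_once_py : Prop := ∀ (levels : List Int), Dom_fix_levels_once_py levels → Spec_fix_levels_once_py levels (fix_levels_once_py levels)

-- ===== LEMMAS AND PROOFS =====

-- proof-only helpers -----------------------------------------------------------
-- j is covered by interval (a,b) iff a < j < b
def pvCovered (j : Nat) (ivs : List (Nat × Nat)) : Bool :=
  ivs.any (fun ab => decide (ab.1 < j) && decide (j < ab.2))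

def pvCountCov (j : Nat) (ivs : List (Nat × Nat)) : Int :=
  ((ivs.filter (fun ab => decide (ab.1 < j ∧ j < ab.2))).length : Int)

-- apply the intervals positionwise; k = absolute index of the head of l
def pvApply (ivs : List (Nat × Nat)) : Nat → List Int → List Int
  | _, [] => []
  | k, v :: rest =>
    (if v ≠ 0 ∧ pvCovered k ivs = true then v - 1 else v) :: pvApply ivs (k+1) rest

-- prefix sum of the first J entries of d
def pvPS (d : List Int) : Nat → Int
  | 0 => 0
  | j+1 => pvPS d j + d.getD j 0

-- basic facts ------------------------------------------------------------------
theorem pvBScan_snd_indep (lv : Int) (rest : List Int) : ∀ (k : Nat) (acc acc' : Option Int),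
    (pvBScan lv k rest acc).2 = (pvBScan lv k rest acc').2 := by
  induction rest with
  | nil => intro k acc acc'; simp [pvBScan]
  | cons clv rest ih =>
    intro k acc acc'
    simp only [pvBScan]
    split_ifs with h0 h1
    · exact ih (k+1) acc acc'
    · rfl
    · exact ih (k+1) _ _

theorem pvBScan_snd_ge (lv : Int) (rest : List Int) : ∀ (k : Nat) (acc : Option Int),
    k ≤ (pvBScan lv k rest acc).2 := by
  induction rest with
  | nil => intro k acc; simp [pvBScan]
  | cons clv rest ih =>
    intro k acc
    simp only [pvBScan]
    split_ifs with h0 h1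
    · exact le_trans (Nat.le_succ k) (ih (k+1) acc)
    · simp
    · exact le_trans (Nat.le_succ k) (ih (k+1) _)

theorem pvBScan_snd_le (lv : Int) (rest : List Int) : ∀ (k : Nat) (acc : Option Int),
    (pvBScan lv k rest acc).2 ≤ k + rest.length := by
  induction rest with
  | nil => intro k acc; simp [pvBScan]
  | cons clv rest ih =>
    intro k acc
    simp only [pvBScan, List.length_cons]
    split_ifs with h0 h1
    · have := ih (k+1) acc; omega
    · simp
    · rw [pvBScan_snd_indep lv rest (k+1) _ none]
      have := ih (k+1) none; omega

theorem pvBScan_fst_some (lv : Int) (rest : List Int) : ∀ (k : Nat) (m : Int),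
    (pvBScan lv k rest (some m)).1 ≠ none := by
  induction rest with
  | nil => intro k m; simp [pvBScan]
  | cons clv rest ih =>
    intro k m
    simp only [pvBScan]
    split_ifs with h0 h1 h2
    · exact ih (k+1) m
    · simp
    · exact ih (k+1) clv
    · exact ih (k+1) m

-- A's min(child_levels) equals B's running minimum
theorem pvBScan_fst_eq_foldl (lv : Int) (rest : List Int) : ∀ (k : Nat) (acc : Option Int),
    (pvBScan lv k rest acc).1 =
      List.foldl (fun acc x => match acc with
        | none => some x
        | some m => if x < m then some x else some m) acc (pvAChildScan lv rest) := by
  induction rest with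
  | nil => intro k acc; simp [pvBScan, pvAChildScan]
  | cons clv rest ih =>
    intro k acc
    simp only [pvBScan, pvAChildScan]
    split_ifs with h0 h1
    · exact ih (k+1) acc
    · simp
    · simp only [List.foldl_cons]; exact ih (k+1) _

theorem pvMin_eq_bscan (lv : Int) (rest : List Int) (k : Nat) :
    PySem.List.min? (pvAChildScan lv rest) (fun x => x) = (pvBScan lv k rest none).1 := by
  rw [pvBScan_fst_eq_foldl lv rest k]
  unfold PySem.List.min?
  congr 1
  funext acc x
  cases acc <;> rfl

-- covered / countCov -----------------------------------------------------------
theorem pvCovered_nil (j : Nat) : pvCovered j [] = false := rfl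

theorem pvCovered_append (j : Nat) (xs ys : List (Nat × Nat)) :
    pvCovered j (xs ++ ys) = (pvCovered j xs || pvCovered j ys) := by
  simp [pvCovered]

theorem pvCountCov_cons (j : Nat) (ab : Nat × Nat) (ivs : List (Nat × Nat)) :
    pvCountCov j (ab :: ivs) = (if ab.1 < j ∧ j < ab.2 then 1 else 0) + pvCountCov j ivs := by
  simp only [pvCountCov, List.filter_cons, decide_eq_true_eq]
  split_ifs with h
  · simp only [List.length_cons]; push_cast; ring
  · simp

theorem pvCountCov_nonneg (j : Nat) (ivs : List (Nat × Nat)) : 0 ≤ pvCountCov j ivs := by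
  simp [pvCountCov]

theorem pvCountCov_pos_iff (j : Nat) (ivs : List (Nat × Nat)) :
    0 < pvCountCov j ivs ↔ pvCovered j ivs = true := by
  induction ivs with
  | nil => simp [pvCountCov, pvCovered]
  | cons ab ivs ih =>
    rw [pvCountCov_cons]
    simp only [pvCovered, List.any_cons, Bool.or_eq_true]
    constructor
    · intro h
      by_cases hc : ab.1 < j ∧ j < ab.2
      · left; simp [hc.1, hc.2]
      · right
        rw [if_neg hc] at h
        simp only [zero_add] at h
        exact (ih.mp h)
    · intro h
      rcases h with h | h
      · simp only [Bool.and_eq_true, decide_eq_true_eq] at h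
        rw [if_pos h]
        have := pvCountCov_nonneg j ivs; omega
      · have := ih.mpr h
        have h2 : (0:Int) ≤ if ab.1 < j ∧ j < ab.2 then 1 else 0 := by split_ifs <;> omega
        omega

-- pvApply ----------------------------------------------------------------------
theorem pvApply_length (ivs : List (Nat × Nat)) (l : List Int) : ∀ (k : Nat),
    (pvApply ivs k l).length = l.length := by
  induction l with
  | nil => intro k; rfl
  | cons v rest ih => intro k; simp [pvApply, ih]

theorem pvApply_get (ivs : List (Nat × Nat)) (l : List Int) : ∀ (k m : Nat),
    (pvApply ivs k l)[m]? = l[m]?.map (fun v => if v ≠ 0 ∧ pvCovered (k+m) ivs = true then v - 1 else v) := by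
  induction l with
  | nil => intro k m; rfl
  | cons v rest ih =>
    intro k m
    cases m with
    | zero => simp [pvApply]
    | succ m =>
      simp only [pvApply, List.getElem?_cons_succ]
      have h : k + 1 + m = k + (m + 1) := by omega
      rw [ih (k+1) m, h]

theorem pvApply_nil_ivs (l : List Int) : ∀ (k : Nat), pvApply [] k l = l := by
  induction l with
  | nil => intro k; rfl
  | cons v rest ih => intro k; simp [pvApply, pvCovered_nil, ih]

-- the write loop, characterised elementwise -----------------------------------
theorem pvAWrite_snd (lv : Int) (rest : List Int) : ∀ (k : Nat) (nl : List Int) (ch : Bool),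
    (pvAWrite lv k rest (nl, ch)).2 = (ch || decide ((pvBScan lv k rest none).1 ≠ none)) := by
  induction rest with
  | nil => intro k nl ch; simp [pvAWrite, pvBScan]
  | cons clv rest ih =>
    intro k nl ch
    simp only [pvAWrite, pvBScan]
    split_ifs with h0 h1
    · exact ih (k+1) nl ch
    · simp
    · rw [ih (k+1) _ true]
      have := pvBScan_fst_some lv rest (k+1) clv
      simp [this]

theorem pvAWrite_fst_get (lv : Int) (rest : List Int) : ∀ (k : Nat) (nl : List Int) (ch : Bool) (m : Nat),
    k + rest.length ≤ nl.length →
    (pvAWrite lv k rest (nl, ch)).1[m]? =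
      if k ≤ m ∧ m < (pvBScan lv k rest none).2 ∧ rest.getD (m - k) 0 ≠ 0
      then some (rest.getD (m - k) 0 - 1) else nl[m]? := by
  induction rest with
  | nil =>
    intro k nl ch m _
    simp only [pvAWrite, pvBScan]
    rw [if_neg (by omega)]
  | cons clv rest ih =>
    intro k nl ch m hlen
    simp only [List.length_cons] at hlen
    by_cases h0 : clv = 0
    · -- skipped entry
      simp only [pvAWrite, pvBScan, if_pos h0]
      rw [ih (k+1) nl ch m (by omega)]
      by_cases hm : m = k
      · subst hm
        have hL : ¬(m + 1 ≤ m ∧ m < (pvBScan lv (m+1) rest none).2 ∧ rest.getD (m - (m+1)) 0 ≠ 0) :=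
          fun h => absurd h.1 (by omega)
        have hR : ¬(m ≤ m ∧ m < (pvBScan lv (m+1) rest none).2 ∧ (clv :: rest).getD (m - m) 0 ≠ 0) := by
          intro h
          exact h.2.2 (by simp [h0])
        rw [if_neg hL, if_neg hR]
      · by_cases hk : k ≤ m
        · have hk1 : k + 1 ≤ m := by omega
          have hget : (clv :: rest).getD (m - k) 0 = rest.getD (m - (k+1)) 0 := by
            have h2 : m - k = (m - (k+1)) + 1 := by omega
            rw [h2, List.getD_cons_succ]
          rw [hget]
          by_cases hc : m < (pvBScan lv (k+1) rest none).2 ∧ rest.getD (m - (k+1)) 0 ≠ 0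
          · rw [if_pos ⟨hk1, hc.1, hc.2⟩, if_pos ⟨hk, hc.1, hc.2⟩]
          · rw [if_neg (fun h => hc ⟨h.2.1, h.2.2⟩), if_neg (fun h => hc ⟨h.2.1, h.2.2⟩)]
        · rw [if_neg (fun h => hk (by omega)), if_neg (fun h => hk h.1)]
    · by_cases h1 : clv ≤ lv
      · -- break
        simp only [pvAWrite, pvBScan, if_neg h0, if_pos h1]
        rw [if_neg (by intro h; obtain ⟨ha, hb, -⟩ := h; omega)]
      · -- write and recurse
        simp only [pvAWrite, pvBScan, if_neg h0, if_neg h1]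
        have hsnd : (pvBScan lv (k+1) rest (some clv)).2 = (pvBScan lv (k+1) rest none).2 :=
          pvBScan_snd_indep lv rest (k+1) _ _
        rw [ih (k+1) (nl.set k (clv - 1)) true m (by simp only [List.length_set]; omega)]
        by_cases hm : m = k
        · subst hm
          have hL : ¬(m + 1 ≤ m ∧ m < (pvBScan lv (m+1) rest none).2 ∧ rest.getD (m - (m+1)) 0 ≠ 0) :=
            fun h => absurd h.1 (by omega)
          rw [if_neg hL, List.getElem?_set_self (by omega)]
          have hge := pvBScan_snd_ge lv rest (m+1) (some clv)
          rw [if_pos ⟨le_refl m, by rw [hsnd] at hge; omega, by simp [h0]⟩]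
          simp
        · rw [List.getElem?_set_ne (fun h => hm h.symm)]
          by_cases hk : k ≤ m
          · have hk1 : k + 1 ≤ m := by omega
            have hget : (clv :: rest).getD (m - k) 0 = rest.getD (m - (k+1)) 0 := by
              have h2 : m - k = (m - (k+1)) + 1 := by omega
              rw [h2, List.getD_cons_succ]
            rw [hget]
            by_cases hc : m < (pvBScan lv (k+1) rest none).2 ∧ rest.getD (m - (k+1)) 0 ≠ 0
            · rw [if_pos ⟨hk1, hc.1, hc.2⟩, if_pos ⟨hk, by rw [hsnd]; exact hc.1, hc.2⟩]
            · rw [if_neg (fun h => hc ⟨h.2.1, h.2.2⟩), if_neg (fun h => hc ⟨by rw [← hsnd]; exact h.2.1, h.2.2⟩)]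
          · rw [if_neg (fun h => hk (by omega)), if_neg (fun h => hk h.1)]

-- writing the interval (i, e) = one more interval applied --------------------
theorem pvAWrite_eq_apply (levels : List Int) (lv : Int) (i : Nat) (ivs : List (Nat × Nat))
    (hi : i < levels.length) (ch : Bool) :
    (pvAWrite lv (i+1) (levels.drop (i+1)) (pvApply ivs 0 levels, ch)).1 =
      pvApply (ivs ++ [(i, (pvBScan lv (i+1) (levels.drop (i+1)) none).2)]) 0 levels := by
  set rest := levels.drop (i+1) with hrest
  set e := (pvBScan lv (i+1) rest none).2 with he
  have hub : e ≤ (i+1) + rest.length := pvBScan_snd_le lv rest (i+1) none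
  have hlenr : rest.length = levels.length - (i+1) := by rw [hrest, List.length_drop]
  have hgd : ∀ (m : Nat) (_ : i + 1 ≤ m) (hm2 : m < levels.length), rest.getD (m - (i+1)) 0 = levels[m] := by
    intro m hm1 hm2
    rw [List.getD_eq_getElem?_getD, hrest, List.getElem?_drop]
    have hadd : i + 1 + (m - (i+1)) = m := by omega
    rw [hadd, List.getElem?_eq_getElem hm2, Option.getD_some]
  apply List.ext_getElem?
  intro m
  have hlen : (i+1) + rest.length ≤ (pvApply ivs 0 levels).length := by
    rw [pvApply_length]; omega
  rw [pvAWrite_fst_get lv rest (i+1) _ ch m hlen, pvApply_get, pvApply_get]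
  have hcov : pvCovered m (ivs ++ [(i, e)]) = (pvCovered m ivs || (decide (i < m) && decide (m < e))) := by
    rw [pvCovered_append]; simp [pvCovered]
  by_cases hm : m < levels.length
  · have hv : levels[m]? = some levels[m] := List.getElem?_eq_getElem hm
    rw [hv]
    simp only [Option.map_some, Nat.zero_add, hcov]
    by_cases hcond : (i+1) ≤ m ∧ m < e ∧ rest.getD (m - (i+1)) 0 ≠ 0
    · rw [if_pos hcond]
      have hval := hgd m hcond.1 hm
      rw [hval] at hcond
      have hc2 : (pvCovered m ivs || (decide (i < m) && decide (m < e))) = true := by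
        have hand : (decide (i < m) && decide (m < e)) = true := by
          simp only [Bool.and_eq_true, decide_eq_true_eq]
          exact ⟨by omega, hcond.2.1⟩
        simp [hand]
      rw [if_pos ⟨hcond.2.2, hc2⟩, hval]
    · rw [if_neg hcond]
      by_cases hnew : i < m ∧ m < e
      · have hz : levels[m] = 0 := by
          by_contra hnz
          exact hcond ⟨by omega, hnew.2, by rw [hgd m (by omega) hm]; exact hnz⟩
        simp [hz]
      · have hfalse : (decide (i < m) && decide (m < e)) = false := by
          simp only [Bool.and_eq_false_iff, decide_eq_false_iff_not]
          by_cases h1 : i < m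
          · right; exact fun h2 => hnew ⟨h1, h2⟩
          · left; exact h1
        rw [hfalse]
        simp
  · have hv : levels[m]? = none := List.getElem?_eq_none (by omega)
    rw [if_neg (fun h => absurd h.2.1 (by omega)), hv]
    simp

-- prefix sums of the difference array -----------------------------------------
theorem pvPS_incAt (d : List Int) (t : Nat) (c : Int) : ∀ (J : Nat),
    pvPS (pvIncAt d t c) J = pvPS d J + if t < J ∧ t < d.length then c else 0 := by
  have hget : ∀ j : Nat, (pvIncAt d t c).getD j 0 = if j = t ∧ t < d.length then d.getD t 0 + c else d.getD j 0 := by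
    intro j
    simp only [pvIncAt, List.getD_eq_getElem?_getD]
    by_cases hj : j = t
    · subst hj
      by_cases hl : j < d.length
      · rw [List.getElem?_set_self hl]
        simp [hl]
      · rw [List.set_eq_of_length_le (by omega)]
        simp [hl]
    · rw [List.getElem?_set_ne (fun h => hj h.symm)]
      simp [hj]
  intro J
  induction J with
  | zero => simp [pvPS]
  | succ j ih =>
    simp only [pvPS]
    rw [ih, hget j]
    by_cases hj : j = t
    · subst hj
      by_cases hl : j < d.length
      · rw [if_pos (show j = j ∧ j < d.length from ⟨rfl, hl⟩),
            if_neg (show ¬(j < j ∧ j < d.length) by omega),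
            if_pos (show j < j + 1 ∧ j < d.length from ⟨by omega, hl⟩)]
        ring
      · rw [if_neg (show ¬(j = j ∧ j < d.length) from fun h => hl h.2),
            if_neg (show ¬(j < j ∧ j < d.length) from fun h => hl h.2),
            if_neg (show ¬(j < j + 1 ∧ j < d.length) from fun h => hl h.2)]
        ring
    · rw [if_neg (show ¬(j = t ∧ t < d.length) from fun h => hj h.1)]
      by_cases hl : t < j ∧ t < d.length
      · rw [if_pos hl, if_pos (show t < j + 1 ∧ t < d.length from ⟨by omega, hl.2⟩)]
        ring
      · rw [if_neg hl, if_neg (show ¬(t < j + 1 ∧ t < d.length) from fun h => hl ⟨by omega, h.2⟩)]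
        ring

theorem pvIncAt_length (d : List Int) (t : Nat) (c : Int) : (pvIncAt d t c).length = d.length := by
  simp [pvIncAt]

theorem pvPS_replicate (n : Nat) : ∀ (J : Nat), pvPS (List.replicate n (0:Int)) J = 0 := by
  intro J
  induction J with
  | zero => rfl
  | succ j ih =>
    simp only [pvPS, ih, List.getD]
    by_cases hj : j < n
    · simp [hj]
    · rw [List.getElem?_eq_none (by simpa using hj)]; rfl

theorem pvBDelta_foldl (n : Nat) : ∀ (ivs : List (Nat × Nat)) (d : List Int),
    d.length = n + 1 →
    (∀ ab ∈ ivs, ab.1 + 1 ≤ n ∧ ab.1 + 1 ≤ ab.2 ∧ ab.2 ≤ n) →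
    ∀ (j : Nat),
      pvPS (ivs.foldl (fun d ab => pvIncAt (pvIncAt d (ab.1 + 1) 1) ab.2 (-1)) d) (j+1) =
        pvPS d (j+1) + pvCountCov j ivs := by
  intro ivs
  induction ivs with
  | nil => intro d _ _ j; simp [pvCountCov]
  | cons ab ivs ih =>
    intro d hlen hb j
    have hab := hb ab List.mem_cons_self
    simp only [List.foldl_cons]
    rw [ih _ (by simp [pvIncAt_length, hlen]) (fun x hx => hb x (List.mem_cons_of_mem _ hx)) j]
    rw [pvPS_incAt, pvPS_incAt, pvCountCov_cons]
    simp only [pvIncAt_length, hlen]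
    by_cases hc : ab.1 < j ∧ j < ab.2
    · rw [if_pos hc,
          if_pos (show ab.1 + 1 < j + 1 ∧ ab.1 + 1 < n + 1 by omega),
          if_neg (show ¬(ab.2 < j + 1 ∧ ab.2 < n + 1) by omega)]
      ring
    · by_cases hc1 : ab.1 + 1 < j + 1
      · rw [if_neg hc,
            if_pos (show ab.1 + 1 < j + 1 ∧ ab.1 + 1 < n + 1 by omega),
            if_pos (show ab.2 < j + 1 ∧ ab.2 < n + 1 by omega)]
        ring
      · rw [if_neg hc,
            if_neg (show ¬(ab.1 + 1 < j + 1 ∧ ab.1 + 1 < n + 1) by omega),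
            if_neg (show ¬(ab.2 < j + 1 ∧ ab.2 < n + 1) by omega)]
        ring

-- the sweep equals pvApply ------------------------------------------------------
theorem pvBSweep_eq_apply (ivs : List (Nat × Nat)) (delta : List Int)
    (hps : ∀ j : Nat, pvPS delta (j+1) = pvCountCov j ivs) :
    ∀ (l : List Int) (j : Nat) (acc : Int), acc = pvPS delta j →
    pvBSweep delta j acc l = pvApply ivs j l := by
  intro l
  induction l with
  | nil => intro j acc _; rfl
  | cons v rest ih =>
    intro j acc hacc
    simp only [pvBSweep, pvApply]
    have hacc' : acc + delta.getD j 0 = pvCountCov j ivs := by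
      rw [hacc]; exact hps j
    congr 1
    · rw [hacc']
      exact if_congr (and_congr_right fun _ => pvCountCov_pos_iff j ivs) rfl rfl
    · exact ih (j+1) _ (by simp only [pvPS]; omega)

-- bounds on collected intervals -------------------------------------------------
theorem pvBCollect_bounds (l : List Int) : ∀ (i : Nat), ∀ ab ∈ pvBCollect i l,
    i ≤ ab.1 ∧ ab.1 + 1 ≤ i + l.length ∧ ab.1 + 1 ≤ ab.2 ∧ ab.2 ≤ i + l.length := by
  induction l with
  | nil => intro i ab h; simp [pvBCollect] at h
  | cons lv rest ih =>
    intro i ab h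
    simp only [pvBCollect] at h
    split_ifs at h with h0
    · have := ih (i+1) ab h
      simp only [List.length_cons]; omega
    · rcases hsc : pvBScan lv (i+1) rest none with ⟨mn, e⟩
      rw [hsc] at h
      cases mn with
      | none =>
        have h' : ab ∈ pvBCollect (i+1) rest := h
        have := ih (i+1) ab h'
        simp only [List.length_cons]; omega
      | some m =>
        have h : ab ∈ (if lv + 1 < m then (i, e) :: pvBCollect (i+1) rest else pvBCollect (i+1) rest) := h
        split_ifs at h with h1
        · rcases List.mem_cons.mp h with h | h
          · subst h
            have hge := pvBScan_snd_ge lv rest (i+1) (none : Option Int)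
            have hle := pvBScan_snd_le lv rest (i+1) (none : Option Int)
            rw [hsc] at hge hle
            simp only [List.length_cons]
            simp at hge hle
            exact ⟨le_refl i, by omega, by omega, by omega⟩
          · have := ih (i+1) ab h
            simp only [List.length_cons]; omega
        · have := ih (i+1) ab h
          simp only [List.length_cons]; omega

-- main invariant: A's outer loop = appending B's collected intervals -----------
theorem pvAOuter_invariant (levels : List Int) : ∀ (l : List Int) (i : Nat) (ivs : List (Nat × Nat)),
    levels.drop i = l →
    pvAOuter i l (pvApply ivs 0 levels, !ivs.isEmpty) =
      (pvApply (ivs ++ pvBCollect i l) 0 levels, !(ivs ++ pvBCollect i l).isEmpty) := by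
  intro l
  induction l with
  | nil => intro i ivs _; simp [pvAOuter, pvBCollect]
  | cons lv rest ih =>
    intro i ivs hdrop
    have hi : i < levels.length := by
      by_contra h
      rw [List.drop_eq_nil_of_le (by omega)] at hdrop
      simp at hdrop
    have hdrop' : levels.drop (i+1) = rest := by
      have h := congrArg List.tail hdrop
      simpa [List.tail_drop] using h
    simp only [pvAOuter, pvBCollect]
    rw [pvMin_eq_bscan lv rest (i+1)]
    split_ifs with h0
    · exact ih (i+1) ivs hdrop'
    · rcases hsc : pvBScan lv (i+1) rest none with ⟨mn, e⟩
      cases mn with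
      | none => simpa [hsc] using ih (i+1) ivs hdrop'
      | some m =>
        simp only []
        by_cases h1 : m ≤ lv + 1
        · rw [if_pos h1, if_neg (by omega)]
          exact ih (i+1) ivs hdrop'
        · rw [if_neg h1, if_pos (by omega)]
          -- the write step produces the state for ivs ++ [(i,e)]
          have hwr : pvAWrite lv (i+1) rest (pvApply ivs 0 levels, !ivs.isEmpty) =
              (pvApply (ivs ++ [(i, e)]) 0 levels, !(ivs ++ [(i, e)]).isEmpty) := by
            have hfst := pvAWrite_eq_apply levels lv i ivs hi (!ivs.isEmpty)
            rw [hdrop', hsc] at hfst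
            have hsnd := pvAWrite_snd lv rest (i+1) (pvApply ivs 0 levels) (!ivs.isEmpty)
            rw [hsc] at hsnd
            simp only at hsnd
            rcases hst : pvAWrite lv (i+1) rest (pvApply ivs 0 levels, !ivs.isEmpty) with ⟨nl', ch'⟩
            rw [hst] at hfst hsnd
            simp only at hfst hsnd
            refine Prod.ext ?_ ?_
            · simpa using hfst
            · simp at hsnd ⊢; simp [hsnd]
          rw [hwr]
          have := ih (i+1) (ivs ++ [(i, e)]) hdrop'
          rw [this]
          rw [List.append_assoc]
          rfl

-- ===== VERDICT (by name: the statement is the Claim_ definition above) =====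
theorem fix_levels_once_py_spec : Claim_equal_fix_levels_once_py := by
  intro levels _
  unfold Spec_fix_levels_once_py fix_levels_once_py
  have hmain := pvAOuter_invariant levels levels 0 [] (by simp)
  rw [pvApply_nil_ivs] at hmain
  simp only [List.nil_append, List.isEmpty_nil, Bool.not_true] at hmain
  rw [hmain]
  set ivs := pvBCollect 0 levels with hivs
  have hb := pvBCollect_bounds levels 0
  have hps : ∀ j : Nat, pvPS (pvBDelta levels.length ivs) (j+1) = pvCountCov j ivs := by
    intro j
    unfold pvBDelta
    rw [pvBDelta_foldl levels.length ivs (List.replicate (levels.length + 1) 0)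
      (by simp) (fun ab hab => by have := hb ab hab; omega) j]
    rw [pvPS_replicate]
    ring
  have halt : fix_levels_once_py_alt levels =
      (pvBSweep (pvBDelta levels.length ivs) 0 0 levels, !ivs.isEmpty) := rfl
  rw [halt, pvBSweep_eq_apply ivs (pvBDelta levels.length ivs) hps levels 0 0 rfl]
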